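-- pv_equiv track=rewrite | github.com/minrq/pMHC | Code/src/good_buffer.py | get_count_adds
-- ===== SOURCE A (Python) =====
-- def get_count_adds(alleles, actions):
--     count_aminos = {}
--     for i, (allele, action) in enumerate(zip(alleles, actions)):
--         allele = tuple(allele)
--         if allele not in count_aminos:
--             count_aminos[allele] = {}
--
--         if tuple(action) not in count_aminos[allele]:
--             count_aminos[allele][tuple(action)] = 0
--
--         count_aminos[allele][tuple(action)] += 1
--
--     return count_aminos
-- ===== SOURCE B (Python) =====
-- def get_count_adds(alleles, actions):
--     pairs = [(tuple(a), tuple(c)) for a, c in zip(alleles, actions)]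
--     return {
--         a: {t: pairs.count((a, t))
--             for t in dict.fromkeys(t2 for a2, t2 in pairs if a2 == a)}
--         for a in dict.fromkeys(a2 for a2, _ in pairs)
--     }
-- ===== Notes on version B (the rewrite author's own statement) =====
-- stated objective: simpler
-- what changed: A accumulates counts by mutating nested dicts pair-by-pair in one scan; B is a declarative comprehension: it deduplicates the alleles and, per allele, its first-seen actions, and fills each cell with pairs.count((allele, action)).
import Mathlib
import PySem

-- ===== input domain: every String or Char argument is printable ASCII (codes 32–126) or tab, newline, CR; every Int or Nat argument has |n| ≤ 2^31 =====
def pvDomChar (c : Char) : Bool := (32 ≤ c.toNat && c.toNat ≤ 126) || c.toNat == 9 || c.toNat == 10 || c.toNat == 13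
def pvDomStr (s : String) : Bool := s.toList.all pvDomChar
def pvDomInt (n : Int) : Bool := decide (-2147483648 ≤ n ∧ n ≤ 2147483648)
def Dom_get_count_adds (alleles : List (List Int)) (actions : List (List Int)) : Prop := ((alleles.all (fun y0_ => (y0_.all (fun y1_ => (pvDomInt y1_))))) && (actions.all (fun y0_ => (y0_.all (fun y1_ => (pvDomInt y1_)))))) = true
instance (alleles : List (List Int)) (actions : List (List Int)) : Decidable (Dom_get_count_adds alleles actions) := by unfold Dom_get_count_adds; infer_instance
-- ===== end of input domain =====

-- B replaces A's one-pass nested-dict accumulation by a declarative dedup-and-count comprehension (simpler, not faster).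

-- ===== PORT A =====
-- one iteration of A's loop body over the current nested dict
def gcaStep (d : PySem.Dict (List Int) (PySem.Dict (List Int) Int)) (p : List Int × List Int) :
    PySem.Dict (List Int) (PySem.Dict (List Int) Int) :=
  -- if allele not in count_aminos: count_aminos[allele] = {}
  let d1 := if d.contains p.1 then d else d.insert p.1 PySem.Dict.empty
  -- count_aminos[allele] (the inner dict Python mutates in place; re-inserted at the same key below)
  let inner := d1.getD p.1 PySem.Dict.empty
  -- if tuple(action) not in count_aminos[allele]: count_aminos[allele][tuple(action)] = 0
  let inner1 := if inner.contains p.2 then inner else inner.insert p.2 0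
  -- count_aminos[allele][tuple(action)] += 1
  let inner2 := inner1.insert p.2 (inner1.getD p.2 0 + 1)
  d1.insert p.1 inner2

def get_count_adds (alleles : List (List Int)) (actions : List (List Int)) :
    List (List Int × List (List Int × Int)) :=
  ((alleles.zip actions).foldl gcaStep PySem.Dict.empty).items.map (fun q => (q.1, q.2.items))

-- ===== PORT B =====
def get_count_adds_alt (alleles : List (List Int)) (actions : List (List Int)) :
    List (List Int × List (List Int × Int)) :=
  let pairs := alleles.zip actions
  (PySem.List.dedup (pairs.map (·.1))).map (fun a =>
    (a, (PySem.List.dedup ((pairs.filter (fun q => q.1 == a)).map (·.2))).map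
          (fun t => (t, (pairs.count (a, t) : Int)))))

-- ===== PRECONDITION & SPEC =====
def Spec_get_count_adds (alleles : List (List Int)) (actions : List (List Int)) (out : List (List Int × List (List Int × Int))) : Prop := out = get_count_adds_alt alleles actions
instance (alleles : List (List Int)) (actions : List (List Int)) (out : List (List Int × List (List Int × Int))) : Decidable (Spec_get_count_adds alleles actions out) := by unfold Spec_get_count_adds; infer_instance

-- ===== CLAIM (what is proved, stated in full; the proofs are below) =====
def Claim_equal_get_count_adds : Prop := ∀ (alleles : List (List Int)) (actions : List (List Int)), Dom_get_count_adds alleles actions → Spec_get_count_adds alleles actions (get_count_adds alleles actions)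

-- ===== LEMMAS AND PROOFS =====

-- the nested dict after A's whole loop
def gcaFold (ps : List (List Int × List Int)) : PySem.Dict (List Int) (PySem.Dict (List Int) Int) :=
  ps.foldl gcaStep PySem.Dict.empty

-- gcaStep in closed form: the branch on `inner.contains p.2` collapses
lemma gcaStep_eq (d : PySem.Dict (List Int) (PySem.Dict (List Int) Int)) (p : List Int × List Int) :
    gcaStep d p =
      (if d.contains p.1 then d else d.insert p.1 PySem.Dict.empty).insert p.1
        ((d.getD p.1 PySem.Dict.empty).insert p.2
          ((d.getD p.1 PySem.Dict.empty).getD p.2 0 + 1)) := by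
  unfold gcaStep
  by_cases hc : d.contains p.1 = true
  · simp only [hc, if_true]
    by_cases hi : (d.getD p.1 PySem.Dict.empty).contains p.2 = true
    · simp [hi]
    · have hi' : (d.getD p.1 PySem.Dict.empty).contains p.2 = false := by simpa using hi
      simp [hi', PySem.Dict.insert_insert_self, PySem.Dict.getD_insert_self,
        PySem.Dict.getD_of_not_contains _ (0 : Int) hi']
  · have hc' : d.contains p.1 = false := by simpa using hc
    have h0 : (d.insert p.1 PySem.Dict.empty).getD p.1 PySem.Dict.empty
        = (PySem.Dict.empty : PySem.Dict (List Int) Int) :=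
      PySem.Dict.getD_insert_self _ _ _ _
    have hd : d.getD p.1 PySem.Dict.empty = (PySem.Dict.empty : PySem.Dict (List Int) Int) :=
      PySem.Dict.getD_of_not_contains _ _ hc'
    simp [hc', h0, hd, PySem.Dict.contains_empty, PySem.Dict.getD_empty,
      PySem.Dict.insert_insert_self]

lemma gcaStep_keys (d : PySem.Dict (List Int) (PySem.Dict (List Int) Int)) (p : List Int × List Int) :
    (gcaStep d p).keys = PySem.Set.add d.keys p.1 := by
  rw [gcaStep_eq]
  by_cases hc : d.contains p.1 = true
  · rw [if_pos hc, PySem.Dict.keys_insert_of_contains _ _ hc,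
      PySem.Set.add_of_mem (by simpa [← PySem.Dict.contains_iff_mem_keys] using hc)]
  · have hc' : d.contains p.1 = false := by simpa using hc
    rw [if_neg hc, PySem.Dict.insert_insert_self,
      PySem.Dict.keys_insert_of_not_contains _ _ hc',
      PySem.Set.add_of_not_mem (by simp [← PySem.Dict.contains_iff_mem_keys, hc'])]

lemma gcaStep_getD_ne (d : PySem.Dict (List Int) (PySem.Dict (List Int) Int))
    (p : List Int × List Int) (a : List Int) (h : a ≠ p.1) :
    (gcaStep d p).getD a PySem.Dict.empty = d.getD a PySem.Dict.empty := by
  rw [gcaStep_eq, PySem.Dict.getD_insert_of_ne _ _ _ h]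
  by_cases hc : d.contains p.1 = true
  · rw [if_pos hc]
  · rw [if_neg hc, PySem.Dict.getD_insert_of_ne _ _ _ h]

lemma gcaStep_getD_self (d : PySem.Dict (List Int) (PySem.Dict (List Int) Int))
    (p : List Int × List Int) :
    (gcaStep d p).getD p.1 PySem.Dict.empty =
      (d.getD p.1 PySem.Dict.empty).insert p.2 ((d.getD p.1 PySem.Dict.empty).getD p.2 0 + 1) := by
  rw [gcaStep_eq, PySem.Dict.getD_insert_self]

-- invariant 1: outer keys are the alleles in first-seen order
lemma gcaFold_keys (ps : List (List Int × List Int)) :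
    (gcaFold ps).keys = PySem.Set.ofList (ps.map (·.1)) := by
  induction ps using List.reverseRecOn with
  | nil => simp [gcaFold, PySem.Dict.keys_empty, PySem.Set.ofList_nil]
  | append_singleton ps p ih =>
    rw [gcaFold, List.foldl_append, List.foldl_cons, List.foldl_nil, gcaStep_keys, ← gcaFold, ih,
      List.map_append, List.map_cons, List.map_nil, PySem.Set.ofList_append_singleton]

-- invariant 2: the inner dict at allele a holds the actions paired with a, in first-seen order
lemma gcaFold_inner_keys (ps : List (List Int × List Int)) (a : List Int) :
    ((gcaFold ps).getD a PySem.Dict.empty).keys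
      = PySem.Set.ofList ((ps.filter (fun q => q.1 == a)).map (·.2)) := by
  induction ps using List.reverseRecOn with
  | nil => simp [gcaFold, PySem.Dict.getD_empty, PySem.Dict.keys_empty, PySem.Set.ofList_nil]
  | append_singleton ps p ih =>
    rw [gcaFold, List.foldl_append, List.foldl_cons, List.foldl_nil, ← gcaFold,
      List.filter_append]
    by_cases h : a = p.1
    · subst h
      rw [gcaStep_getD_self]
      simp only [List.filter_cons, List.filter_nil, beq_self_eq_true, if_true,
        List.map_append, List.map_cons, List.map_nil, PySem.Set.ofList_append_singleton]
      by_cases hi : ((gcaFold ps).getD p.1 PySem.Dict.empty).contains p.2 = true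
      · rw [PySem.Dict.keys_insert_of_contains _ _ hi, ih,
          PySem.Set.add_of_mem (by rw [← ih]; exact (PySem.Dict.contains_iff_mem_keys _ _).mp hi)]
      · have hi' : ((gcaFold ps).getD p.1 PySem.Dict.empty).contains p.2 = false := by
          simpa using hi
        rw [PySem.Dict.keys_insert_of_not_contains _ _ hi', ih,
          PySem.Set.add_of_not_mem
            (by rw [← ih]; simp [← PySem.Dict.contains_iff_mem_keys, hi'])]
    · rw [gcaStep_getD_ne _ _ _ h, ih]
      have hb : (p.1 == a) = false := by simpa using fun e => h e.symm
      simp [hb]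

-- invariant 3: the inner dict's value at action t is the number of (a, t) pairs seen
lemma gcaFold_inner_getD (ps : List (List Int × List Int)) (a t : List Int) :
    ((gcaFold ps).getD a PySem.Dict.empty).getD t 0 = (ps.count (a, t) : Int) := by
  induction ps using List.reverseRecOn with
  | nil => simp [gcaFold, PySem.Dict.getD_empty]
  | append_singleton ps p ih =>
    rw [gcaFold, List.foldl_append, List.foldl_cons, List.foldl_nil, ← gcaFold,
      List.count_append]
    by_cases h : a = p.1
    · subst h
      rw [gcaStep_getD_self]
      by_cases ht : t = p.2
      · subst ht
        have hp : p = (p.1, p.2) := rfl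
        rw [PySem.Dict.getD_insert_self, ih, ← hp]
        simp
      · have hne : ¬ p = (p.1, t) := fun e => ht (by rw [e])
        rw [PySem.Dict.getD_insert_of_ne _ _ _ ht, ih]
        simp [hne]
    · have hne : ¬ p = (a, t) := fun e => h (by rw [e])
      rw [gcaStep_getD_ne _ _ _ h, ih]
      simp [hne]

lemma gcaFold_keys_nodup (ps : List (List Int × List Int)) : (gcaFold ps).keys.Nodup := by
  rw [gcaFold_keys]; exact PySem.Set.nodup_ofList _

lemma gcaFold_inner_keys_nodup (ps : List (List Int × List Int)) (a : List Int) :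
    ((gcaFold ps).getD a PySem.Dict.empty).keys.Nodup := by
  rw [gcaFold_inner_keys]; exact PySem.Set.nodup_ofList _

-- ===== VERDICT (by name: the statement is the Claim_ definition above) =====
theorem get_count_adds_spec : Claim_equal_get_count_adds := by
  intro alleles actions _
  unfold Spec_get_count_adds get_count_adds get_count_adds_alt
  set ps := alleles.zip actions with hps
  rw [show ps.foldl gcaStep PySem.Dict.empty = gcaFold ps from rfl]
  rw [PySem.Dict.items_eq_map_keys _ (gcaFold_keys_nodup ps) PySem.Dict.empty,
    List.map_map, gcaFold_keys]
  simp only [PySem.List.dedup_eq_ofList]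
  apply List.map_congr_left
  intro a _
  simp only [Function.comp_apply]
  refine Prod.ext rfl ?_
  rw [PySem.Dict.items_eq_map_keys _ (gcaFold_inner_keys_nodup ps a) 0, gcaFold_inner_keys]
  apply List.map_congr_left
  intro t _
  exact Prod.ext rfl (gcaFold_inner_getD ps a t)
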